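-- pv_equiv track=rewrite | github.com/Pedro-silva-viana/Processador-arquitetura-de-computadores-UFCA | VerificaResultado.py | preenche_matriz
-- ===== SOURCE A (Python) =====
-- def preenche_matriz(N: int, inicio: int, string: str) -> tuple:
--     saida = [[0 for _ in range(N)] for _ in range(N)]
--     cont = 0
--     for i in range(N):
--         for j in range(N):
--             saida[i][j] = int(string[inicio + cont], 16)
--             cont += 1
--     return (saida, inicio + cont)
-- ===== SOURCE B (Python) =====
-- def _le_linha(largura: int, pos: int, string: str) -> tuple:
--     linha = []
--     while largura > 0:
--         linha.append(int(string[pos], 16))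
--         pos += 1
--         largura -= 1
--     return (linha, pos)
--
--
-- def _le_linhas(restantes: int, pos: int, string: str, N: int) -> tuple:
--     if restantes <= 0:
--         return ([], pos)
--     linha, pos = _le_linha(N, pos, string)
--     resto, pos = _le_linhas(restantes - 1, pos, string, N)
--     return ([linha] + resto, pos)
--
--
-- def preenche_matriz(N: int, inicio: int, string: str) -> tuple:
--     return _le_linhas(N, inicio, string, N)
-- ===== Notes on version B (the rewrite author's own statement) =====
-- stated objective: alternative
-- what changed: Instead of preallocating a zero matrix and mutating cells via nested index loops with a counter, B recurses over rows, building each row by consuming the string with a threaded position (append + advance), so no preallocation, indices or counter exist.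
import Mathlib
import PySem

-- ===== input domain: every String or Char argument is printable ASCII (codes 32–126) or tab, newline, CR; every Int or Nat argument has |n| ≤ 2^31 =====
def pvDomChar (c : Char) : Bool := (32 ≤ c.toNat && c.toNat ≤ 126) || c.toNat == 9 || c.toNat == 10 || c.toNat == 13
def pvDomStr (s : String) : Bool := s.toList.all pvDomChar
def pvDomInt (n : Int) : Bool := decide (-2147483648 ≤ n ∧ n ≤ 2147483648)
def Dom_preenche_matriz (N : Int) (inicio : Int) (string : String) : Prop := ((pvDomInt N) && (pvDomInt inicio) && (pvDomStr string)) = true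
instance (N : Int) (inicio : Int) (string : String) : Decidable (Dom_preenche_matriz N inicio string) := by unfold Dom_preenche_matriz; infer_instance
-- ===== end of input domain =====

-- B replaces A's preallocated-zero-matrix nested index loops (with a cell counter) by a
-- row recursion that consumes the string with a threaded position; objective: alternative.


-- ===== PORT A =====
-- int(string[i], 16): Python raises exactly where this option is none (IndexError from the
-- index, ValueError from int(·,16)); those inputs are excluded by Pre_, the .getD 0 below never fires there.
def pvHexAt? (s : String) (i : Int) : Option Int :=
  (PySem.Str.pyGet? s i).bind (fun c => PySem.Int.ofCharsBase? [c] 16)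

def pvHexAt (s : String) (i : Int) : Int := (pvHexAt? s i).getD 0

-- literal transliteration of A: zero matrix, then nested loops mutating saida[i][j] and cont
def preenche_matriz (N : Int) (inicio : Int) (string : String) : List (List Int) × Int :=
  let rng := PySem.List.pyRange 0 N 1
  let saida := rng.map (fun _ => rng.map (fun _ => (0 : Int)))
  let res := rng.foldl (fun st i =>
      rng.foldl (fun st j =>
        (PySem.List.pySetD st.1 i
           (PySem.List.pySetD (PySem.List.pyGetD st.1 i []) j (pvHexAt string (inicio + st.2))),
         st.2 + 1)) st)
    (saida, 0)
  (res.1, inicio + res.2)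

-- ===== PORT B =====
-- _le_linha's while loop: append one hex digit, advance the position, until largura runs out
def pvLeLinha (largura : Int) (pos : Int) (s : String) (linha : List Int) : List Int × Int :=
  if 0 < largura then
    pvLeLinha (largura - 1) (pos + 1) s (linha ++ [pvHexAt s pos])
  else (linha, pos)
termination_by largura.toNat
decreasing_by omega

-- _le_linhas: recursion over the remaining rows, threading the position
def pvLeLinhas (restantes : Int) (pos : Int) (s : String) (N : Int) : List (List Int) × Int :=
  if restantes ≤ 0 then ([], pos)
  else
    let lp := pvLeLinha N pos s []
    let r := pvLeLinhas (restantes - 1) lp.2 s N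
    (lp.1 :: r.1, r.2)
termination_by restantes.toNat
decreasing_by omega

def preenche_matriz_alt (N : Int) (inicio : Int) (string : String) : List (List Int) × Int :=
  pvLeLinhas N inicio string N

-- ===== PRECONDITION & SPEC =====
-- exactly the inputs on which Python A returns: either no cell is read (N <= 0), or all N*N
-- consecutive read positions are in range (Python index semantics, including negative inicio
-- wrapping once) and every char read is a hex digit; stated as a slice condition so it is
-- checkable without running the loops.
def Pre_preenche_matriz (N : Int) (inicio : Int) (string : String) : Prop :=
  (max N 0) * (max N 0) = 0 ∨
    (-(string.toList.length : Int) ≤ inicio ∧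
     inicio + (max N 0) * (max N 0) ≤ (string.toList.length : Int) ∧
     (((string.toList.drop
          (if inicio < 0 then ((string.toList.length : Int) + inicio).toNat else inicio.toNat))
        ++ (if inicio < 0 then string.toList else [])).take
          ((max N 0) * (max N 0)).toNat).all
       (fun c => (PySem.Int.ofCharsBase? [c] 16).isSome) = true)

instance (N : Int) (inicio : Int) (string : String) : Decidable (Pre_preenche_matriz N inicio string) := by
  unfold Pre_preenche_matriz; infer_instance

def pvWitness_preenche_matriz : Int × Int × String := (2, 1, "xAb3Fx")

def Spec_preenche_matriz (N : Int) (inicio : Int) (string : String) (out : List (List Int) × Int) : Prop := out = preenche_matriz_alt N inicio string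
instance (N : Int) (inicio : Int) (string : String) (out : List (List Int) × Int) : Decidable (Spec_preenche_matriz N inicio string out) := by unfold Spec_preenche_matriz; infer_instance

-- ===== CLAIM (what is proved, stated in full; the proofs are below) =====
def Claim_equal_preenche_matriz : Prop := ∀ (N : Int) (inicio : Int) (string : String), Dom_preenche_matriz N inicio string → Pre_preenche_matriz N inicio string → Spec_preenche_matriz N inicio string (preenche_matriz N inicio string)

-- ===== LEMMAS AND PROOFS =====

-- the value written at flat position t (row r, column j)
def pvRow (g : Nat → Int) (m r : Nat) : List Int :=
  (List.range m).map (fun j => g (r * m + j))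

-- A's inner loop: k steps through row i rewrite its first k cells and advance the counter by k
lemma pv_inner (g : Int → Int) (k : Nat) (saida : List (List Int)) (i : Nat) (c0 : Int)
    (hi : i < saida.length) (hk : k ≤ (saida.getD i []).length) :
    (List.range k).foldl
      (fun (st : List (List Int) × Int) (j : Nat) =>
        (st.1.set i ((st.1.getD i []).set j (g st.2)), st.2 + 1)) (saida, c0)
    = (saida.set i (((List.range k).map (fun (j : Nat) => g (c0 + (j : Int)))) ++ (saida.getD i []).drop k),
       c0 + (k : Int)) := by
  induction k with
  | zero =>
      simp only [List.range_zero, List.map_nil, List.foldl_nil, List.drop_zero,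
        List.nil_append, Nat.cast_zero, add_zero]
      rw [List.getD_eq_getElem _ _ hi, List.set_getElem_self]
  | succ k ih =>
      rw [List.range_succ, List.foldl_append, ih (by omega)]
      have hrow : saida.getD i [] = saida[i] := List.getD_eq_getElem _ _ hi
      have hlen : k < saida[i].length := by rw [hrow] at hk; omega
      have hplen : ((List.range k).map (fun (j : Nat) => g (c0 + (j : Int)))).length = k := by simp
      simp only [List.foldl_cons, List.foldl_nil, List.set_set, Prod.mk.injEq]
      refine ⟨?_, by push_cast; ring⟩
      rw [List.getD_eq_getElem _ _ (by simpa using hi), List.getElem_set_self]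
      rw [List.set_append, hplen]
      simp only [lt_irrefl, if_false, Nat.sub_self]
      rw [hrow, List.drop_eq_getElem_cons hlen, List.set_cons_zero]
      simp

-- A's outer loop: after i rows the first i rows are filled and the counter is i*m
lemma pv_outer (g : Int → Int) (m : Nat) (i : Nat) (hi : i ≤ m) :
    (List.range i).foldl
      (fun (st : List (List Int) × Int) (r : Nat) =>
        (List.range m).foldl
          (fun (st : List (List Int) × Int) (j : Nat) =>
            (st.1.set r ((st.1.getD r []).set j (g st.2)), st.2 + 1)) st)
      (List.replicate m (List.replicate m (0 : Int)), 0)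
    = ((List.range i).map (fun r => pvRow (fun t => g (t : Int)) m r)
         ++ (List.replicate m (List.replicate m (0 : Int))).drop i,
       ((i * m : Nat) : Int)) := by
  induction i with
  | zero => simp
  | succ i ih =>
      rw [List.range_succ, List.foldl_append, ih (by omega)]
      simp only [List.foldl_cons, List.foldl_nil]
      set P := (List.range i).map (fun r => pvRow (fun t => g (t : Int)) m r) with hP
      have hPlen : P.length = i := by simp [hP]
      have hi' : i < (P ++ (List.replicate m (List.replicate m (0 : Int))).drop i).length := by
        simp [hPlen]; omega
      have hrowi : (P ++ (List.replicate m (List.replicate m (0 : Int))).drop i).getD i []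
          = List.replicate m (0 : Int) := by
        rw [List.getD_eq_getElem _ _ hi', List.getElem_append_right (by omega)]
        simp [hPlen]
      rw [pv_inner g m _ i _ hi' (by rw [hrowi]; simp)]
      rw [hrowi]
      have hdropm : (List.replicate m (0 : Int)).drop m = [] := by simp
      rw [hdropm, List.append_nil]
      have him : i < (List.replicate m (List.replicate m (0 : Int))).length := by
        simp; omega
      simp only [Prod.mk.injEq]
      refine ⟨?_, by push_cast; ring⟩
      rw [List.set_append, hPlen]
      simp only [lt_irrefl, if_false, Nat.sub_self]
      rw [List.drop_eq_getElem_cons him, List.set_cons_zero]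
      have hrow2 : (List.range m).map (fun (j : Nat) => g (((i * m : Nat) : Int) + (j : Int)))
          = pvRow (fun t => g (t : Int)) m i := by
        unfold pvRow
        apply List.map_congr_left
        intro j _
        push_cast
        ring_nf
      rw [hrow2]
      simp [hP]

-- B's while loop: reading m cells from pos appends those m hex digits and advances pos by m
lemma pv_le_linha (s : String) (m : Nat) (pos : Int) (acc : List Int) :
    pvLeLinha (m : Int) pos s acc
    = (acc ++ (List.range m).map (fun (j : Nat) => pvHexAt s (pos + (j : Int))), pos + (m : Int)) := by
  induction m generalizing pos acc with
  | zero => rw [pvLeLinha]; simp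
  | succ m ih =>
      rw [pvLeLinha]
      have h0 : (0 : Int) < ((m + 1 : Nat) : Int) := by push_cast; omega
      rw [if_pos h0]
      have h1 : ((m + 1 : Nat) : Int) - 1 = (m : Int) := by push_cast; ring
      rw [h1, ih]
      rw [List.range_succ_eq_map]
      simp only [List.map_cons, List.map_map, Nat.cast_zero, add_zero, List.append_assoc,
        List.singleton_append, Prod.mk.injEq]
      constructor
      · congr 1
        congr 1
        apply List.map_congr_left
        intro j _
        simp only [Function.comp]
        congr 1
        push_cast
        ring
      · push_cast; ring

-- B's row recursion: i rows from pos give the i row-slices and advance pos by i*m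
lemma pv_le_linhas (s : String) (m : Nat) (i : Nat) (pos : Int) :
    pvLeLinhas (i : Int) pos s (m : Int)
    = ((List.range i).map (fun r =>
          (List.range m).map (fun (j : Nat) => pvHexAt s (pos + ((r * m + j : Nat) : Int)))),
       pos + ((i * m : Nat) : Int)) := by
  induction i generalizing pos with
  | zero => rw [pvLeLinhas]; simp
  | succ i ih =>
      rw [pvLeLinhas]
      have h0 : ¬ ((i + 1 : Nat) : Int) ≤ 0 := by push_cast; omega
      rw [if_neg h0]
      have h1 : ((i + 1 : Nat) : Int) - 1 = (i : Int) := by push_cast; ring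
      simp only [pv_le_linha, List.nil_append, h1, ih]
      rw [List.range_succ_eq_map]
      simp only [List.map_cons, List.map_map, Prod.mk.injEq]
      constructor
      · congr 1
        · apply List.map_congr_left
          intro j _
          congr 1
          push_cast
          ring
        · apply List.map_congr_left
          intro r _
          simp only [Function.comp]
          apply List.map_congr_left
          intro j _
          congr 1
          push_cast
          ring
      · push_cast; ring

-- ===== VERDICT (by name: the statement is the Claim_ definition above) =====
theorem preenche_matriz_spec : Claim_equal_preenche_matriz := by
  intro N inicio string _ _
  dsimp only [Spec_preenche_matriz, preenche_matriz, preenche_matriz_alt]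
  by_cases hN : N ≤ 0
  · have h1 : PySem.List.pyRange 0 N 1 = [] := PySem.List.pyRange_one_eq_nil (by omega)
    rw [pvLeLinhas, if_pos hN]
    simp [h1]
  · set m : Nat := N.toNat with hm
    have hNm : N = (m : Int) := by omega
    set g : Int → Int := fun t => pvHexAt string (inicio + t) with hg
    have hrng : PySem.List.pyRange 0 N 1 = (List.range m).map (Nat.cast : Nat → Int) := by
      rw [PySem.List.pyRange_one]
      have hNt : (N - 0).toNat = m := by omega
      rw [hNt]
      simp
    rw [hrng]
    have hzero : ((List.range m).map (Nat.cast : Nat → Int)).map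
        (fun _ => ((List.range m).map (Nat.cast : Nat → Int)).map (fun _ => (0 : Int)))
        = List.replicate m (List.replicate m (0 : Int)) := by
      simp [Function.comp_def]
    rw [hzero, List.foldl_map]
    have hA := pv_outer g m m (le_refl m)
    simp only [List.foldl_map] at hA ⊢
    simp only [PySem.List.pySetD_natCast, PySem.List.pyGetD_natCast] at hA ⊢
    rw [hA]
    have hdropm : (List.replicate m (List.replicate m (0 : Int))).drop m = [] := by simp
    rw [hdropm, List.append_nil]
    rw [hNm, pv_le_linhas string m m inicio]
    rfl
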